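-- pv_equiv track=rewrite | github.com/archive-dev-korean/Coding_note | programmers/Python/LV1/기사단원의 무기.py | solution
-- ===== SOURCE A (Python) =====
-- def solution(number, limit, power):
--     answer = 0
--     lst=[]
--     for i in range(1, number+1):
--         cnt =0
--         for j in range(1, i+1):
--             if i % j == 0:
--                 cnt += 1
--         if cnt >= limit:
--             answer += power
--         else:
--             answer += cnt
--     return answer
-- ===== SOURCE B (Python) =====
-- def solution(number, limit, power):
--     # divisor-count sieve: for each j, bump every multiple of j once
--     cnt = {}
--     for j in range(1, number + 1):
--         for m in range(j, number + 1, j):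
--             cnt[m] = cnt.get(m, 0) + 1
--     answer = 0
--     for i in range(1, number + 1):
--         c = cnt.get(i, 0)
--         answer += power if c >= limit else c
--     return answer
-- ===== Notes on version B (the rewrite author's own statement) =====
-- stated objective: faster
-- what changed: Replaced A's per-number trial division over all j ≤ i by a single divisor-count sieve that bumps a dict entry for every multiple of each j, then one pass summing power-or-count.
import Mathlib
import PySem

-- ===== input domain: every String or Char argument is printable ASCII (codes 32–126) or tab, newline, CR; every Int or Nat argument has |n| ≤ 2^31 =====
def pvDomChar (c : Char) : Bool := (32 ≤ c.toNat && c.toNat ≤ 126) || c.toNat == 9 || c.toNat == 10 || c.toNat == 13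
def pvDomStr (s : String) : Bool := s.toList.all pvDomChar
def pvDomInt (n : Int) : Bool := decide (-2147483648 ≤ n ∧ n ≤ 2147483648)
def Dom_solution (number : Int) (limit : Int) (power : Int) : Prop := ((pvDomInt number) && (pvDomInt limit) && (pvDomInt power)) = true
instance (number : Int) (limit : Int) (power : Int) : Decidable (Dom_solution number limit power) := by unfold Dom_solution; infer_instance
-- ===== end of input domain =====

-- B replaces A's per-number trial division (O(n^2)) by a divisor-count sieve over multiples (O(n log n)); objective: faster.

-- ===== PORT A =====
-- (A's local 'lst = []' is never read; it is omitted.)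
def solution (number : Int) (limit : Int) (power : Int) : Int :=
  (PySem.List.pyRange 1 (number + 1) 1).foldl
    (fun answer i =>
      let cnt := (PySem.List.pyRange 1 (i + 1) 1).foldl
        (fun c j => if PySem.Int.mod i j = 0 then c + 1 else c) 0
      if cnt ≥ limit then answer + power else answer + cnt) 0

-- ===== PORT B =====
def solution_alt (number : Int) (limit : Int) (power : Int) : Int :=
  let cnt := (PySem.List.pyRange 1 (number + 1) 1).foldl
    (fun d j => (PySem.List.pyRange j (number + 1) j).foldl
      (fun d m => d.modify m 0 (· + 1)) d)
    (PySem.Dict.empty : PySem.Dict Int Int)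
  (PySem.List.pyRange 1 (number + 1) 1).foldl
    (fun answer i =>
      let c := cnt.getD i 0
      answer + (if c ≥ limit then power else c)) 0

-- ===== PRECONDITION & SPEC =====
def Spec_solution (number : Int) (limit : Int) (power : Int) (out : Int) : Prop := out = solution_alt number limit power
instance (number : Int) (limit : Int) (power : Int) (out : Int) : Decidable (Spec_solution number limit power out) := by unfold Spec_solution; infer_instance

-- ===== CLAIM (what is proved, stated in full; the proofs are below) =====
def Claim_equal_solution : Prop := ∀ (number : Int) (limit : Int) (power : Int), Dom_solution number limit power → Spec_solution number limit power (solution number limit power)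

-- ===== LEMMAS AND PROOFS =====

-- a nested accumulation loop is a single loop over the concatenation
theorem pv_foldl_nested_eq_flatMap {α β γ : Type} (l : List α) (g : α → List β)
    (f : γ → β → γ) (init : γ) :
    l.foldl (fun acc x => (g x).foldl f acc) init = (l.flatMap g).foldl f init := by
  induction l generalizing init with
  | nil => simp
  | cons a t ih => simp [List.flatMap_cons, List.foldl_append, ih]

-- a 0/1 indicator sum is countP
theorem pv_sum_map_indicator {α : Type} (l : List α) (p : α → Bool) :
    (l.map (fun x => if p x then (1 : Nat) else 0)).sum = l.countP p := by
  induction l with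
  | nil => simp
  | cons a t ih => by_cases h : p a <;> simp [h, ih, Nat.add_comm]

-- count of an element in a positive-step range is its membership indicator
theorem pv_count_pyRange_pos (j b i : Int) (hj : 0 < j) :
    List.count i (PySem.List.pyRange j b j)
      = if i ∈ PySem.List.pyRange j b j then 1 else 0 := by
  have hnd : (PySem.List.pyRange j b j).Nodup := by
    rw [PySem.List.pyRange_of_pos j b hj]
    refine List.Nodup.map ?_ List.nodup_range
    intro x y hxy
    have hxy' : j * (x : Int) = j * y := by linarith
    have := mul_left_cancel₀ (by omega : (j : Int) ≠ 0) hxy'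
    exact_mod_cast this
  by_cases hm : i ∈ PySem.List.pyRange j b j
  · simp [hm, List.count_eq_one_of_mem hnd hm]
  · simp [hm, List.count_eq_zero_of_not_mem hm]

-- the sieve's table holds exactly A's divisor count, for 1 ≤ i ≤ n
theorem pv_sieve_getD (n i : Int) (hi1 : 1 ≤ i) (hin : i ≤ n) :
    (((PySem.List.pyRange 1 (n + 1) 1).foldl
        (fun d j => (PySem.List.pyRange j (n + 1) j).foldl
          (fun d m => d.modify m 0 (· + 1)) d)
        (PySem.Dict.empty : PySem.Dict Int Int)).getD i 0)
      = (PySem.List.pyRange 1 (i + 1) 1).foldl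
          (fun c j => if PySem.Int.mod i j = 0 then c + 1 else c) 0 := by
  rw [pv_foldl_nested_eq_flatMap]
  rw [PySem.Dict.getD_foldl_modify_add_one]
  rw [PySem.List.foldl_ite_add_one (p := fun j => PySem.Int.mod i j = 0)]
  simp only [PySem.Dict.getD_empty, zero_add, List.count_flatMap]
  -- left side: Σ_j indicator(i ∈ multiples of j up to n)
  have hmapcg : ((PySem.List.pyRange 1 (n + 1) 1).map
        (List.count i ∘ fun j => PySem.List.pyRange j (n + 1) j)).sum
      = ((PySem.List.pyRange 1 (n + 1) 1).map
          (fun j => if decide (i ∈ PySem.List.pyRange j (n + 1) j) then (1 : Nat) else 0)).sum := by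
    apply congrArg
    apply List.map_congr_left
    intro j hj
    have hj1 : 1 ≤ j := ((PySem.List.mem_pyRange_one).1 hj).1
    simp only [Function.comp_apply]
    rw [pv_count_pyRange_pos j (n + 1) i (by omega)]
    by_cases h : i ∈ PySem.List.pyRange j (n + 1) j <;> simp [h]
  rw [hmapcg, pv_sum_map_indicator]
  -- now: countP (i ∈ multiples of j) over [1..n] = countP (j ∣ i) over [1..i]
  have hsplit : PySem.List.pyRange 1 (n + 1) 1
      = PySem.List.pyRange 1 (i + 1) 1 ++ PySem.List.pyRange (i + 1) (n + 1) 1 :=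
    PySem.List.pyRange_one_append 1 (i + 1) (n + 1) (by omega) (by omega)
  rw [hsplit, List.countP_append]
  have h2 : (PySem.List.pyRange (i + 1) (n + 1) 1).countP
      (fun j => decide (i ∈ PySem.List.pyRange j (n + 1) j)) = 0 := by
    apply List.countP_eq_zero.2
    intro j hj
    have hj1 : i + 1 ≤ j := ((PySem.List.mem_pyRange_one).1 hj).1
    simp only [decide_eq_true_eq]
    intro hmem
    have := (PySem.List.mem_pyRange_iff_of_pos (by omega : (0:Int) < j) i).1 hmem
    omega
  rw [h2, Nat.add_zero]
  congr 1
  apply List.countP_congr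
  intro j hj
  have hj' := (PySem.List.mem_pyRange_one).1 hj
  simp only [decide_eq_true_eq]
  constructor
  · intro hmem
    have h := (PySem.List.mem_pyRange_iff_of_pos (by omega : (0:Int) < j) i).1 hmem
    have hdvd : j ∣ i := by
      have h3 := dvd_add h.2.2 (dvd_refl j)
      simpa using h3
    exact (PySem.Int.mod_eq_zero_iff_dvd i j).2 hdvd
  · intro hmod
    have hdvd : j ∣ i := (PySem.Int.mod_eq_zero_iff_dvd i j).1 hmod
    refine (PySem.List.mem_pyRange_iff_of_pos (by omega : (0:Int) < j) i).2 ?_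
    refine ⟨by omega, by omega, ?_⟩
    exact dvd_sub hdvd (dvd_refl j)

-- ===== VERDICT (by name: the statement is the Claim_ definition above) =====
theorem solution_spec : Claim_equal_solution := by
  intro number limit power _
  unfold Spec_solution solution solution_alt
  apply PySem.List.foldl_congr_mem
  intro acc i hi
  have hi' := (PySem.List.mem_pyRange_one).1 hi
  have hcnt := pv_sieve_getD number i (by omega) (by omega)
  simp only [hcnt]
  split_ifs <;> ring
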